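-- pv_equiv track=rewrite | github.com/bnt52012/astreli | backend/knowledge/knowledge_engine.py | _select_relevant_modifiers
-- ===== SOURCE A (Python) =====
-- def _select_relevant_modifiers(
--
--     modifiers: list[str],
--     context: str,
--     max_count: int = 5,
-- ) -> list[str]:
--     """Select the most relevant modifiers based on scene context."""
--     if not modifiers:
--         return []
--
--     context_lower = context.lower()
--     scored = []
--     for mod in modifiers:
--         # Score by word overlap with context
--         words = mod.lower().split()
--         overlap = sum(1 for w in words if w in context_lower)
--         scored.append((mod, overlap))
--
--     # Sort by relevance, take top N
--     scored.sort(key=lambda x: x[1], reverse=True)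
--     return [mod for mod, _ in scored[:max_count]]
-- ===== SOURCE B (Python) =====
-- def _select_relevant_modifiers(
--     modifiers: list[str],
--     context: str,
--     max_count: int = 5,
-- ) -> list[str]:
--     """Select the most relevant modifiers based on scene context (bucket/counting sort)."""
--     context_lower = context.lower()
--     scored = [
--         (sum(1 for w in mod.lower().split() if w in context_lower), mod)
--         for mod in modifiers
--     ]
--     buckets = {}
--     for s, mod in scored:
--         buckets.setdefault(s, []).append(mod)
--     best = 0
--     for s, _ in scored:
--         if s > best:
--             best = s
--     ranked = []
--     for s in range(best, -1, -1):
--         ranked.extend(buckets.get(s, []))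
--     return ranked[:max_count]
-- ===== Notes on version B (the rewrite author's own statement) =====
-- stated objective: alternative
-- what changed: Replaces the comparison sort with a counting/bucket sort: modifiers are appended to per-score buckets in original order (preserving stable tie order) and the buckets are emitted from the highest score down, so no sort call is needed; the empty-input guard becomes unnecessary.
import Mathlib
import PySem

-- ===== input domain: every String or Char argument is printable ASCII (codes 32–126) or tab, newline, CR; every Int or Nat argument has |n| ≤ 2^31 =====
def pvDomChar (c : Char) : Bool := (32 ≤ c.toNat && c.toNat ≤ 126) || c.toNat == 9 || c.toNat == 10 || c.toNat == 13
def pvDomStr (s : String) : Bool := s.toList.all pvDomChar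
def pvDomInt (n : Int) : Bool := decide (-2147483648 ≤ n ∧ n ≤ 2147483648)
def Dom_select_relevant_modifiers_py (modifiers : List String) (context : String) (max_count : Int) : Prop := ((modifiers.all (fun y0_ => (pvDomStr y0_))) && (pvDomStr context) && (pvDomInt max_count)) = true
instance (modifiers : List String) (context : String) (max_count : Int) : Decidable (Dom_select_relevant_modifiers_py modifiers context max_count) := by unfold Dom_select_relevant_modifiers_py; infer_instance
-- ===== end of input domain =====

-- ===== PORT A =====
-- B replaces A's comparison sort by a stable counting/bucket sort over the scores; equal on all inputs.
def select_relevant_modifiers_py (modifiers : List String) (context : String) (max_count : Int) : List String :=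
  if modifiers = [] then []
  else
    let context_lower := PySem.Str.lower context
    let scored := modifiers.foldl (fun acc mod =>
      let words := PySem.Str.split₀ (PySem.Str.lower mod)
      let overlap := (words.map (fun w => if PySem.Str.isIn w context_lower then (1 : Int) else 0)).sum
      acc ++ [(mod, overlap)]) []
    let sortedScored := PySem.List.sorted scored (fun x => x.2) true
    (PySem.List.slice sortedScored none (some max_count)).map (fun x => x.1)

-- ===== PORT B =====
def select_relevant_modifiers_py_alt (modifiers : List String) (context : String) (max_count : Int) : List String :=
  let context_lower := PySem.Str.lower context
  let scored := modifiers.map (fun mod =>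
    (((PySem.Str.split₀ (PySem.Str.lower mod)).map
        (fun w => if PySem.Str.isIn w context_lower then (1 : Int) else 0)).sum, mod))
  let buckets := scored.foldl (fun d p => d.modify p.1 [] (fun l => l ++ [p.2])) (PySem.Dict.empty : PySem.Dict Int (List String))
  let best := scored.foldl (fun b p => if b < p.1 then p.1 else b) 0
  let ranked := (PySem.List.pyRange best (-1) (-1)).flatMap (fun s => buckets.getD s [])
  PySem.List.slice ranked none (some max_count)

-- ===== PRECONDITION & SPEC =====
def Spec_select_relevant_modifiers_py (modifiers : List String) (context : String) (max_count : Int) (out : List String) : Prop := out = select_relevant_modifiers_py_alt modifiers context max_count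
instance (modifiers : List String) (context : String) (max_count : Int) (out : List String) : Decidable (Spec_select_relevant_modifiers_py modifiers context max_count out) := by unfold Spec_select_relevant_modifiers_py; infer_instance

-- ===== CLAIM (what is proved, stated in full; the proofs are below) =====
def Claim_equal_select_relevant_modifiers_py : Prop := ∀ (modifiers : List String) (context : String) (max_count : Int), Dom_select_relevant_modifiers_py modifiers context max_count → Spec_select_relevant_modifiers_py modifiers context max_count (select_relevant_modifiers_py modifiers context max_count)

-- ===== LEMMAS AND PROOFS =====

theorem pv_insertBy_skip {α : Type} (before : α → α → Bool) (x : α) (ys zs : List α)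
    (h : ∀ y ∈ ys, before x y = false) :
    PySem.List.insertBy before x (ys ++ zs) = ys ++ PySem.List.insertBy before x zs := by
  induction ys with
  | nil => simp
  | cons y t ih =>
    have hy : before x y = false := h y (by simp)
    simp [PySem.List.insertBy, hy, ih (fun z hz => h z (by simp [hz]))]

theorem pv_insertBy_front {α : Type} (before : α → α → Bool) (x : α) (zs : List α)
    (h : ∀ z ∈ zs, before x z = true) :
    PySem.List.insertBy before x zs = x :: zs := by
  cases zs with
  | nil => rfl
  | cons z t => simp [PySem.List.insertBy, h z (by simp)]

theorem pv_flatMap_congr {α β : Type} (S : List α) (f g : α → List β)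
    (h : ∀ s ∈ S, f s = g s) : S.flatMap f = S.flatMap g := by
  induction S with
  | nil => rfl
  | cons s t ih =>
    simp only [List.flatMap_cons, h s (by simp), ih (fun z hz => h z (by simp [hz]))]

theorem pv_insertBy_flatMap {α : Type} (key : α → Int) (S : List Int)
    (hS : S.Pairwise (· > ·)) (f : Int → List α)
    (hf : ∀ s ∈ S, ∀ p ∈ f s, key p = s) (x : α) (hx : key x ∈ S) :
    PySem.List.insertBy (fun a b => decide (key b < key a)) x (S.flatMap f)
      = S.flatMap (fun s => f s ++ if key x == s then [x] else []) := by
  induction S with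
  | nil => simp at hx
  | cons s0 S' ih =>
    have hS' : S'.Pairwise (· > ·) := hS.of_cons
    have hgt : ∀ s ∈ S', s0 > s := fun s hs => List.rel_of_pairwise_cons hS hs
    by_cases hkx : key x = s0
    · have h1 : ∀ y ∈ f s0, (fun a b => decide (key b < key a)) x y = false := by
        intro y hy
        simp [hf s0 (by simp) y hy, hkx]
      have h2 : ∀ z ∈ S'.flatMap f, (fun a b => decide (key b < key a)) x z = true := by
        intro z hz
        rcases List.mem_flatMap.mp hz with ⟨s, hs, hzf⟩
        have := hf s (by simp [hs]) z hzf
        simp [this, hkx]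
        exact hgt s hs
      rw [List.flatMap_cons, pv_insertBy_skip _ _ _ _ h1, pv_insertBy_front _ _ _ h2]
      rw [List.flatMap_cons]
      have : S'.flatMap (fun s => f s ++ if key x == s then [x] else []) = S'.flatMap f := by
        apply pv_flatMap_congr
        intro s hs
        have : key x ≠ s := by have := hgt s hs; omega
        simp [this]
      rw [this]
      simp [hkx]
    · have hx' : key x ∈ S' := by
        rcases List.mem_cons.mp hx with h | h
        · exact absurd h hkx
        · exact h
      have hlt : key x < s0 := hgt _ hx'
      have h1 : ∀ y ∈ f s0, (fun a b => decide (key b < key a)) x y = false := by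
        intro y hy
        simp [hf s0 (by simp) y hy]
        omega
      rw [List.flatMap_cons, pv_insertBy_skip _ _ _ _ h1, List.flatMap_cons]
      have hne : (key x == s0) = false := by simp [hkx]
      rw [ih hS' (fun s hs => hf s (by simp [hs])) hx']
      simp [hne]

theorem pv_sorted_eq_flatMap {α : Type} (key : α → Int) (L : List α) (S : List Int)
    (hS : S.Pairwise (· > ·)) (hL : ∀ p ∈ L, key p ∈ S) :
    PySem.List.sorted L key true = S.flatMap (fun s => L.filter (fun p => key p == s)) := by
  induction L using List.reverseRecOn with
  | nil => simp [PySem.List.sorted]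
  | append_singleton L x ih =>
    rw [PySem.List.sorted_rev_eq_foldl_insertBy, List.foldl_append, List.foldl_cons, List.foldl_nil,
        ← PySem.List.sorted_rev_eq_foldl_insertBy]
    rw [ih (fun p hp => hL p (by simp [hp]))]
    rw [pv_insertBy_flatMap key S hS _ (fun s _ p hp => by
          have := List.of_mem_filter hp
          exact eq_of_beq this) x (hL x (by simp))]
    apply pv_flatMap_congr
    intro s _
    simp [List.filter_append, List.filter_singleton, beq_iff_eq]

theorem pv_foldl_max_init {α : Type} (xs : List (Int × α)) (a : Int) :
    a ≤ xs.foldl (fun b p => if b < p.1 then p.1 else b) a := by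
  induction xs generalizing a with
  | nil => simp
  | cons x t ih =>
    simp only [List.foldl_cons]
    by_cases h : a < x.1
    · simp only [h, if_pos]
      exact le_trans (le_of_lt h) (ih x.1)
    · simp only [h]
      exact ih a

theorem pv_foldl_max_mem {α : Type} (xs : List (Int × α)) (a : Int) (p : Int × α) (hp : p ∈ xs) :
    p.1 ≤ xs.foldl (fun b q => if b < q.1 then q.1 else b) a := by
  induction xs generalizing a with
  | nil => simp at hp
  | cons x t ih =>
    simp only [List.foldl_cons]
    rcases List.mem_cons.mp hp with h | h
    · subst h
      by_cases hax : a < p.1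
      · simp only [hax, if_pos]
        exact pv_foldl_max_init t p.1
      · simp only [hax]
        exact le_trans (by omega) (pv_foldl_max_init t a)
    · exact ih _ h

theorem pv_slice_map {α β : Type} (f : α → β) (xs : List α) (b : Int) :
    PySem.List.slice (xs.map f) none (some b) = (PySem.List.slice xs none (some b)).map f := by
  simp [PySem.List.slice, PySem.List.clampIdx, List.map_take]

theorem pv_pyRange_down (best : Int) (h : 0 ≤ best) :
    PySem.List.pyRange best (-1) (-1) = (List.range (best + 1).toNat).map (fun k : Nat => best - (k : Int)) := by
  have hlt : (-1 : Int) < best := by omega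
  simp only [PySem.List.pyRange]
  rw [if_neg (by norm_num), if_neg (by norm_num), if_pos hlt]
  have : ((best - -1 + - -1 - 1) / - -1) = best + 1 := by norm_num
  rw [this]
  apply List.map_congr_left
  intro k _
  omega

-- ===== VERDICT (by name: the statement is the Claim_ definition above) =====
theorem pv_core (modifiers : List String) (sc : String → Int) (hnn : ∀ m, 0 ≤ sc m) (mc : Int) :
    (PySem.List.slice
        (PySem.List.sorted (modifiers.foldl (fun acc mod => acc ++ [(mod, sc mod)]) []) (fun x => x.2) true)
        none (some mc)).map (fun x => x.1)
      = PySem.List.slice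
          ((PySem.List.pyRange
              (List.foldl (fun b p => if b < p.1 then p.1 else b) 0 (modifiers.map (fun m => (sc m, m)))) (-1) (-1)).flatMap
            (fun s =>
              (List.foldl (fun d p => d.modify p.1 [] fun l => l ++ [p.2])
                  (PySem.Dict.empty : PySem.Dict Int (List String)) (modifiers.map (fun m => (sc m, m)))).getD s []))
          none (some mc) := by
  have hfold : modifiers.foldl (fun acc mod => acc ++ [(mod, sc mod)]) [] = modifiers.map (fun m => (m, sc m)) := by
    simpa using PySem.List.foldl_append_singleton_eq_map (fun m : String => (m, sc m)) modifiers ([] : List (String × Int))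
  set B := modifiers.map (fun m => (sc m, m)) with hB
  set best := List.foldl (fun b p => if b < p.1 then p.1 else b) 0 B with hbest
  have hb0 : (0 : Int) ≤ best := pv_foldl_max_init B 0
  have hmem : ∀ m ∈ modifiers, sc m ≤ best := fun m hm =>
    pv_foldl_max_mem B 0 (sc m, m) (List.mem_map_of_mem hm)
  rw [pv_pyRange_down best hb0]
  set S := (List.range (best + 1).toNat).map (fun k : Nat => best - (k : Int)) with hS
  have hSpair : S.Pairwise (· > ·) := by
    rw [hS]
    exact List.Pairwise.map _ (fun a b h => by omega) (List.pairwise_lt_range)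
  have hSmem : ∀ m ∈ modifiers, sc m ∈ S := by
    intro m hm
    rw [hS]
    refine List.mem_map.mpr ⟨(best - sc m).toNat, List.mem_range.mpr ?_, ?_⟩
    · have h1 := hnn m; have h2 := hmem m hm; omega
    · have h1 := hnn m; have h2 := hmem m hm; omega
  rw [hfold, pv_sorted_eq_flatMap (fun p => p.2) (modifiers.map (fun m => (m, sc m))) S hSpair
        (by intro p hp; rcases List.mem_map.mp hp with ⟨m, hm, rfl⟩; exact hSmem m hm)]
  rw [← pv_slice_map]
  congr 1
  rw [List.map_flatMap]
  apply pv_flatMap_congr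
  intro s hs
  rw [PySem.Dict.getD_foldl_modify_append]
  simp [hB, List.filter_map, List.map_map, Function.comp_def]

-- ===== VERDICT (by name: the statement is the Claim_ definition above) =====
theorem select_relevant_modifiers_py_spec : Claim_equal_select_relevant_modifiers_py := by
  intro modifiers context max_count _
  unfold Spec_select_relevant_modifiers_py select_relevant_modifiers_py select_relevant_modifiers_py_alt
  by_cases hm : modifiers = []
  · subst hm
    simp [PySem.List.pyRange, PySem.List.slice, PySem.Dict.getD, PySem.Dict.get?, PySem.Dict.empty]
  · rw [if_neg hm]
    exact pv_core modifiers
      (fun mod => ((PySem.Str.split₀ (PySem.Str.lower mod)).map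
        (fun w => if PySem.Str.isIn w (PySem.Str.lower context) then (1 : Int) else 0)).sum)
      (fun m => List.sum_nonneg (by
        intro x hx
        rcases List.mem_map.mp hx with ⟨w, hw, rfl⟩
        split <;> omega))
      max_count
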